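-- pv_equiv track=rewrite | github.com/liyoface/cs61a-2024-Summer-personal | discussion/disc04/disc04.py | even_weighted_loop
-- ===== SOURCE A (Python) =====
-- def even_weighted_loop(s):
--     """
--     >>> x = [1, 2, 3, 4, 5, 6
--     >>> even_weighted_loop(x)
--     [0, 6, 20]
--     """
--     "*** YOUR CODE HERE ***"
--     count = 0
--     output = []
--     for i in s:
--         if count % 2 == 0:
--             output += [count * i]
--         count = count + 1
--     return output
-- ===== SOURCE B (Python) =====
-- def even_weighted_loop(s):
--     lst = list(s)
--     return [i * lst[i] for i in range(0, len(lst), 2)]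
-- ===== Notes on version B (the rewrite author's own statement) =====
-- stated objective: idiomatic
-- what changed: B drops the running counter and parity branch: it materializes the input once and steps directly over the even indices with range(0, len, 2), indexing each weighted element.
import Mathlib
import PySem

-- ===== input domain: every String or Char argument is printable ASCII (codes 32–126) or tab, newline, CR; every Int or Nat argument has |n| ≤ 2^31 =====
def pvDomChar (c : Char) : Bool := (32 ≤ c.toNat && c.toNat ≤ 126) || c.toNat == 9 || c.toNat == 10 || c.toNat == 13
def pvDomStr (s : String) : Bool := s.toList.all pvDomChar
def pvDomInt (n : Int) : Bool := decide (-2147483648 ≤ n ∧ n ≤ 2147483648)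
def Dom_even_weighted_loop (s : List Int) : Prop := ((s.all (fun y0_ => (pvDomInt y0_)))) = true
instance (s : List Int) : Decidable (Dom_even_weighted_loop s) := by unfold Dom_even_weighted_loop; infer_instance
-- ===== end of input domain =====

-- B replaces A's running counter + parity branch by stepping directly over the even
-- indices with range(0, len, 2); idiomatic rewrite, same O(n) cost.


-- ===== PORT A =====
-- count = 0; output = []; for i in s: if count % 2 == 0: output += [count*i]; count += 1
def even_weighted_loop (s : List Int) : List Int :=
  (s.foldl
    (fun (st : Int × List Int) i =>
      (st.1 + 1, if PySem.Int.mod st.1 2 == 0 then st.2 ++ [st.1 * i] else st.2))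
    (0, [])).2

-- ===== PORT B =====
-- lst = list(s); [i * lst[i] for i in range(0, len(lst), 2)]
-- (lst[i] is always in range here, so pyGetD with any default is exact)
def even_weighted_loop_alt (s : List Int) : List Int :=
  (PySem.List.pyRange 0 (s.length : Int) 2).map
    (fun i => i * PySem.List.pyGetD s i 0)

-- ===== PRECONDITION & SPEC =====
def Spec_even_weighted_loop (s : List Int) (out : List Int) : Prop := out = even_weighted_loop_alt s
instance (s : List Int) (out : List Int) : Decidable (Spec_even_weighted_loop s out) := by unfold Spec_even_weighted_loop; infer_instance

-- ===== CLAIM (what is proved, stated in full; the proofs are below) =====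
def Claim_equal_even_weighted_loop : Prop := ∀ (s : List Int), Dom_even_weighted_loop s → Spec_even_weighted_loop s (even_weighted_loop s)

-- ===== LEMMAS AND PROOFS =====

-- closed form both ports are reduced to
def pvF (s : List Int) (c : Int) : List Int :=
  (List.range ((s.length + 1) / 2)).map (fun k : Nat => (c + 2 * (k : Int)) * s.getD (2 * k) 0)

theorem loopA_eq_pvF : ∀ (xs : List Int) (c : Int) (acc : List Int), c % 2 = 0 →
    (xs.foldl
      (fun (st : Int × List Int) i =>
        (st.1 + 1, if PySem.Int.mod st.1 2 == 0 then st.2 ++ [st.1 * i] else st.2))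
      (c, acc)).2 = acc ++ pvF xs c
  | [], c, acc, _ => by simp [pvF]
  | [x], c, acc, hc => by
    have h1 : (PySem.Int.mod c 2 == 0) = true := by
      simp [PySem.Int.mod, Int.fmod_eq_emod, hc]
    simp only [List.foldl_cons, List.foldl_nil, h1, if_true]
    simp [pvF]
  | x :: y :: rest, c, acc, hc => by
    have h1 : (PySem.Int.mod c 2 == 0) = true := by
      simp [PySem.Int.mod, Int.fmod_eq_emod, hc]
    have h2 : (PySem.Int.mod (c + 1) 2 == 0) = false := by
      simp [PySem.Int.mod, Int.fmod_eq_emod]; omega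
    have hc2 : (c + 1 + 1) % 2 = 0 := by omega
    have ih := loopA_eq_pvF rest (c + 1 + 1) (acc ++ [c * x]) hc2
    simp only [List.foldl_cons, h1, h2, if_true, Bool.false_eq_true, if_false]
    rw [ih]
    have hlen : ((x :: y :: rest).length + 1) / 2 = (rest.length + 1) / 2 + 1 := by
      simp; omega
    simp only [pvF, hlen, List.range_succ_eq_map, List.map_cons, List.map_map,
      List.append_assoc, List.singleton_append]
    show acc ++ c * x :: List.map _ _ = acc ++ _ :: List.map _ _
    refine congrArg (acc ++ ·) (congrArg₂ List.cons ?_ ?_)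
    · simp
    · apply List.map_congr_left
      intro k _
      simp only [Function.comp, Nat.succ_eq_add_one]
      have hidx : 2 * (k + 1) = 2 * k + 1 + 1 := by omega
      rw [hidx]
      simp only [List.getD_cons_succ]
      push_cast
      ring_nf

theorem altB_eq_pvF (s : List Int) : even_weighted_loop_alt s = pvF s 0 := by
  unfold even_weighted_loop_alt pvF
  rw [PySem.List.pyRange_of_pos 0 (s.length : Int) (by norm_num)]
  have hcount : (if (0:Int) < (s.length : Int) then
      (((s.length : Int) - 0 + 2 - 1) / 2).toNat else 0) = (s.length + 1) / 2 := by
    split_ifs with h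
    · omega
    · omega
  rw [hcount, List.map_map]
  apply List.map_congr_left
  intro k _
  simp only [Function.comp]
  have h : (0 : Int) + 2 * (k : Int) = ((2 * k : Nat) : Int) := by push_cast; ring
  rw [h, PySem.List.pyGetD_natCast]

-- ===== VERDICT (by name: the statement is the Claim_ definition above) =====
theorem even_weighted_loop_spec : Claim_equal_even_weighted_loop := by
  intro s _
  unfold Spec_even_weighted_loop even_weighted_loop
  rw [altB_eq_pvF, loopA_eq_pvF s 0 [] (by norm_num)]
  exact List.nil_append _
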